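-- pv_equiv track=rewrite | github.com/rubenmnty/pitch-sequencer | pitch_history.py | consecutive_usage_for_pitch
-- ===== SOURCE A (Python) =====
-- def is_actual_pitch_event(item: str) -> bool:
--     if item.startswith("Ball Quality |"):
--         return False
--     parts = [p.strip() for p in item.split("|")]
--     return len(parts) >= 3
--
-- def get_recent_pitch_events(history):
--     events = []
--     for item in history:
--         if not is_actual_pitch_event(item):
--             continue
--         parts = [p.strip() for p in item.split("|")]
--         pitch = parts[0]
--         location = parts[1]
--         outcome = parts[2]
--         events.append(
--             {
--                 "pitch": pitch,
--                 "location": location,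
--                 "outcome": outcome,
--                 "raw": item,
--             }
--         )
--     return events
--
-- def consecutive_usage_for_pitch(pitch_name: str, history) -> int:
--     events = get_recent_pitch_events(history)
--     count = 0
--
--     for event in reversed(events):
--         current_pitch = event["pitch"].strip().lower()
--         if current_pitch == pitch_name.strip().lower():
--             count += 1
--         else:
--             break
--
--     return count
-- ===== SOURCE B (Python) =====
-- def consecutive_usage_for_pitch(pitch_name: str, history) -> int:
--     # Single forward pass: keep the length of the current trailing run of the
--     # target pitch, resetting to 0 whenever a different actual pitch appears.
--     target = pitch_name.strip().lower()
--     run = 0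
--     for item in history:
--         if item.startswith("Ball Quality |"):
--             continue
--         parts = [p.strip() for p in item.split("|")]
--         if len(parts) < 3:
--             continue
--         run = run + 1 if parts[0].lower() == target else 0
--     return run
-- ===== Notes on version B (the rewrite author's own statement) =====
-- stated objective: simpler
-- what changed: Replaces building a list of event dicts and reverse-scanning it with break by a single forward pass that keeps a trailing-run counter reset on every non-matching actual pitch event, using no intermediate list.
import Mathlib
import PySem

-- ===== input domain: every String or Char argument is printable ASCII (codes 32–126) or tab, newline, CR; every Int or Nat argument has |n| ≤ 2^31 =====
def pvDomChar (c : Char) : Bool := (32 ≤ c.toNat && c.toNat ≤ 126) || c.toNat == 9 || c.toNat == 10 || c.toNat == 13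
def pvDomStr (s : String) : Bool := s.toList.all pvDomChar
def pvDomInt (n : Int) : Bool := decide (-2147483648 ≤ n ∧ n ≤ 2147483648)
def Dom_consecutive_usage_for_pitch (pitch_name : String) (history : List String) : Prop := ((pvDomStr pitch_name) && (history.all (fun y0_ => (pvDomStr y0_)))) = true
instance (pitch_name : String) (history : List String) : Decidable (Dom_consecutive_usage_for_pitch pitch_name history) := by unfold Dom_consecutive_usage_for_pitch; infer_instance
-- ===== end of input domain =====

-- B replaces A's build-event-dicts-then-reverse-scan-with-break by a single forward pass
-- keeping a trailing-run counter (objective: simpler; return value only, no side effects).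

-- ===== PORT A =====
-- item.split("|"): sep "|" ≠ "", so split? is always some; .getD [] is unreachable padding.
def is_actual_pitch_event (item : String) : Bool :=
  if PySem.Str.startswith item "Ball Quality |" then false
  else
    let parts := ((PySem.Str.split? item "|").getD []).map PySem.Str.strip
    decide (3 ≤ parts.length)

-- parts[0]/parts[1]/parts[2]: guarded by is_actual_pitch_event (len(parts) >= 3), so the
-- pyGetD default "" is unreachable; the dict literal is PySem.Dict.mk in insertion order.
def get_recent_pitch_events (history : List String) : List (PySem.Dict String String) :=
  history.foldl (fun events item =>
    if !(is_actual_pitch_event item) then events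
    else
      let parts := ((PySem.Str.split? item "|").getD []).map PySem.Str.strip
      let pitch := PySem.List.pyGetD parts 0 ""
      let location := PySem.List.pyGetD parts 1 ""
      let outcome := PySem.List.pyGetD parts 2 ""
      events ++ [PySem.Dict.mk [("pitch", pitch), ("location", location), ("outcome", outcome), ("raw", item)]]) []

-- the 'for event in reversed(events): … else: break' loop, with its count accumulator;
-- event["pitch"] is guarded construction (key always present), so the getD "" default is unreachable.
def pvLoopA (pitch_name : String) : List (PySem.Dict String String) → Int → Int
  | [], count => count
  | event :: rest, count =>
    let current_pitch := PySem.Str.lower (PySem.Str.strip (PySem.Dict.getD event "pitch" ""))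
    if current_pitch == PySem.Str.lower (PySem.Str.strip pitch_name) then
      pvLoopA pitch_name rest (count + 1)
    else count

def consecutive_usage_for_pitch (pitch_name : String) (history : List String) : Int :=
  pvLoopA pitch_name (get_recent_pitch_events history).reverse 0

-- ===== PORT B =====
def consecutive_usage_for_pitch_alt (pitch_name : String) (history : List String) : Int :=
  let target := PySem.Str.lower (PySem.Str.strip pitch_name)
  history.foldl (fun run item =>
    if PySem.Str.startswith item "Ball Quality |" then run
    else
      let parts := ((PySem.Str.split? item "|").getD []).map PySem.Str.strip
      if parts.length < 3 then run
      else if PySem.Str.lower (PySem.List.pyGetD parts 0 "") == target then run + 1 else 0) 0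

-- ===== PRECONDITION & SPEC =====
def Spec_consecutive_usage_for_pitch (pitch_name : String) (history : List String) (out : Int) : Prop := out = consecutive_usage_for_pitch_alt pitch_name history
instance (pitch_name : String) (history : List String) (out : Int) : Decidable (Spec_consecutive_usage_for_pitch pitch_name history out) := by unfold Spec_consecutive_usage_for_pitch; infer_instance

-- ===== CLAIM (what is proved, stated in full; the proofs are below) =====
def Claim_equal_consecutive_usage_for_pitch : Prop := ∀ (pitch_name : String) (history : List String), Dom_consecutive_usage_for_pitch pitch_name history → Spec_consecutive_usage_for_pitch pitch_name history (consecutive_usage_for_pitch pitch_name history)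

-- ===== LEMMAS AND PROOFS =====

-- strip is idempotent (needed because A re-strips the already-stripped parts[0])
theorem pv_dw_idem {p : Char → Bool} (l : List Char) : (l.dropWhile p).dropWhile p = l.dropWhile p := by
  rw [List.dropWhile_eq_self_iff]
  intro hl
  have h := List.head_dropWhile_not p (l := l) (by intro h; simp [h] at hl)
  simpa [List.head_eq_getElem] using h

theorem pv_dw_head_not {p : Char → Bool} (s : List Char) (hl : 0 < (List.dropWhile p s).length) :
    ¬ p (List.dropWhile p s)[0] = true := by
  have h := List.head_dropWhile_not p (l := s) (w := by intro h; simp [h] at hl)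
  simpa [List.head_eq_getElem] using h

theorem pv_strip_idem_chars (s : List Char) : PySem.Chars.strip (PySem.Chars.strip s) = PySem.Chars.strip s := by
  simp only [PySem.Chars.strip, PySem.Chars.lstrip, PySem.Chars.rstrip]
  have hpre : (List.dropWhile PySem.Chars.isspace (List.dropWhile PySem.Chars.isspace s).reverse).reverse
      <+: List.dropWhile PySem.Chars.isspace s := by
    have := List.dropWhile_suffix (l := (List.dropWhile PySem.Chars.isspace s).reverse) PySem.Chars.isspace
    simpa using this.reverse
  have hx : List.dropWhile PySem.Chars.isspace
      (List.dropWhile PySem.Chars.isspace (List.dropWhile PySem.Chars.isspace s).reverse).reverse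
      = (List.dropWhile PySem.Chars.isspace (List.dropWhile PySem.Chars.isspace s).reverse).reverse := by
    rw [List.dropWhile_eq_self_iff]
    intro hl
    have hlt : 0 < (List.dropWhile PySem.Chars.isspace s).length := by
      have := hpre.length_le; omega
    have h0 := List.IsPrefix.getElem hpre hl
    rw [h0]
    exact pv_dw_head_not s hlt
  rw [hx, List.reverse_reverse, pv_dw_idem]

theorem pv_strip_idem (s : String) : PySem.Str.strip (PySem.Str.strip s) = PySem.Str.strip s := by
  rw [← String.toList_inj]
  simp [pv_strip_idem_chars]

-- the normalized pitch name of an item, as B computes it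
def pvNorm (item : String) : String :=
  PySem.Str.lower (PySem.List.pyGetD (((PySem.Str.split? item "|").getD []).map PySem.Str.strip) 0 "")

-- A's per-item event dict
def pvEventOf (item : String) : PySem.Dict String String :=
  let parts := ((PySem.Str.split? item "|").getD []).map PySem.Str.strip
  PySem.Dict.mk [("pitch", PySem.List.pyGetD parts 0 ""), ("location", PySem.List.pyGetD parts 1 ""),
    ("outcome", PySem.List.pyGetD parts 2 ""), ("raw", item)]

-- generic trailing-run counter on the name list
def pvRun (t : String) : List String → Int → Int
  | [], c => c
  | x :: r, c => if x == t then pvRun t r (c + 1) else c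

theorem pv_events_eq (history : List String) :
    get_recent_pitch_events history =
      (history.filter is_actual_pitch_event).map pvEventOf := by
  unfold get_recent_pitch_events
  have h : ∀ (acc : List (PySem.Dict String String)) (item : String),
      (if !(is_actual_pitch_event item) then acc
       else
        let parts := ((PySem.Str.split? item "|").getD []).map PySem.Str.strip
        let pitch := PySem.List.pyGetD parts 0 ""
        let location := PySem.List.pyGetD parts 1 ""
        let outcome := PySem.List.pyGetD parts 2 ""
        acc ++ [PySem.Dict.mk [("pitch", pitch), ("location", location), ("outcome", outcome), ("raw", item)]]) =
      (if is_actual_pitch_event item then acc ++ [pvEventOf item] else acc) := by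
    intro acc item
    by_cases hp : is_actual_pitch_event item <;> simp [hp, pvEventOf]
  calc history.foldl _ [] = history.foldl
        (fun acc item => if is_actual_pitch_event item then acc ++ [pvEventOf item] else acc) [] := by
        exact PySem.List.foldl_congr_mem _ _ _ _ (fun acc item _ => h acc item)
    _ = _ := by simpa using PySem.List.foldl_append_if is_actual_pitch_event pvEventOf history []

-- A's extracted pitch equals B's normalized pitch (strip is idempotent)
theorem pv_pitch_eq (item : String) :
    PySem.Str.lower (PySem.Str.strip (PySem.Dict.getD (pvEventOf item) "pitch" "")) = pvNorm item := by
  unfold pvEventOf pvNorm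
  cases hsp : (PySem.Str.split? item "|").getD [] with
  | nil => simp [PySem.Dict.getD, PySem.Dict.get?]; decide
  | cons x xs =>
    simp [PySem.Dict.getD, PySem.Dict.get?, PySem.List.pyGetD, PySem.List.pyIdx?, PySem.List.pyGet?,
      pv_strip_idem]

-- A's reverse loop over the event dicts is pvRun over the normalized names
theorem pv_loopA_eq (pitch_name : String) (l : List String) (c : Int) :
    pvLoopA pitch_name (l.map pvEventOf) c =
      pvRun (PySem.Str.lower (PySem.Str.strip pitch_name)) (l.map pvNorm) c := by
  induction l generalizing c with
  | nil => rfl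
  | cons x r ih =>
    simp only [List.map_cons, pvLoopA, pvRun, pv_pitch_eq]
    split <;> simp [ih]

theorem pv_run_acc (t : String) (l : List String) (c : Int) : pvRun t l c = c + pvRun t l 0 := by
  induction l generalizing c with
  | nil => simp [pvRun]
  | cons x r ih =>
    by_cases hx : x == t
    · simp only [pvRun, hx, if_pos]
      rw [ih (c + 1), ih (0 + 1)]; ring
    · simp [pvRun, hx]

-- B's reset fold computes the trailing run of the name list
theorem pv_fold_run (t : String) (l : List String) :
    l.foldl (fun run x => if x == t then run + 1 else 0) 0 = pvRun t l.reverse 0 := by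
  induction l using List.reverseRecOn with
  | nil => rfl
  | append_singleton r x ih =>
    rw [List.foldl_append]
    simp only [List.foldl_cons, List.foldl_nil, List.reverse_append, List.reverse_cons,
      List.reverse_nil, List.nil_append, List.cons_append, pvRun]
    by_cases hx : x == t
    · simp only [hx, if_pos]
      rw [pv_run_acc, ih]; ring
    · simp [hx]

-- B's fold over history equals the reset fold over the normalized names of the kept items
theorem pv_alt_eq (pitch_name : String) (history : List String) :
    consecutive_usage_for_pitch_alt pitch_name history =
      ((history.filter is_actual_pitch_event).map pvNorm).foldl
        (fun run x => if x == PySem.Str.lower (PySem.Str.strip pitch_name) then run + 1 else 0) 0 := by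
  unfold consecutive_usage_for_pitch_alt
  have h : ∀ (run : Int) (item : String),
      (if PySem.Str.startswith item "Ball Quality |" then run
       else
        let parts := ((PySem.Str.split? item "|").getD []).map PySem.Str.strip
        if parts.length < 3 then run
        else if PySem.Str.lower (PySem.List.pyGetD parts 0 "") == PySem.Str.lower (PySem.Str.strip pitch_name)
          then run + 1 else 0) =
      (if is_actual_pitch_event item then
        (if pvNorm item == PySem.Str.lower (PySem.Str.strip pitch_name) then run + 1 else 0) else run) := by
    intro run item
    unfold is_actual_pitch_event pvNorm
    split_ifs <;> first | rfl | simp_all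
  show history.foldl (fun run item =>
      if PySem.Str.startswith item "Ball Quality |" then run
      else
        let parts := ((PySem.Str.split? item "|").getD []).map PySem.Str.strip
        if parts.length < 3 then run
        else if PySem.Str.lower (PySem.List.pyGetD parts 0 "") == PySem.Str.lower (PySem.Str.strip pitch_name)
          then run + 1 else 0) 0 = _
  rw [PySem.List.foldl_congr_mem _ _ _ _ (fun run item _ => h run item),
    PySem.List.foldl_if_eq_foldl_filter, List.foldl_map]

-- ===== VERDICT (by name: the statement is the Claim_ definition above) =====
theorem consecutive_usage_for_pitch_spec : Claim_equal_consecutive_usage_for_pitch := by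
  intro pitch_name history _
  unfold Spec_consecutive_usage_for_pitch consecutive_usage_for_pitch
  rw [pv_events_eq, pv_alt_eq, pv_fold_run, ← List.map_reverse, pv_loopA_eq, List.map_reverse]
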